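-- pv_equiv track=rewrite | github.com/MikaylaArran/live-news-block | scripts/fetch_news.py | label_cluster
-- ===== SOURCE A (Python) =====
-- TOPIC_LEXICON = {
--     "Geopolitics & security": ["war","military","nuclear","sanctions","border","defense","attack","navy"],
--     "Elections & governance": ["election","vote","parliament","government","president","minister","court","policy"],
--     "Economy & markets": ["inflation","gdp","economy","bank","interest","rate","currency","trade","jobs","markets"],
--     "Tech & AI": ["ai","artificial","chip","cyber","data","software","platform"],
--     "Climate & disasters": ["climate","flood","storm","drought","wildfire","earthquake"],
--     "Public safety & crime": ["police","arrest","trial","fraud","shooting","crime"]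
-- }
--
-- def label_cluster(cluster):
--     counts = cluster["tok_counts"]
--     best_topic = None
--     best_score = 0
--     for topic, words in TOPIC_LEXICON.items():
--         score = sum(counts.get(w, 0) for w in words)
--         if score > best_score:
--             best_score = score
--             best_topic = topic
--     return best_topic or "Other"
-- ===== SOURCE B (Python) =====
-- TOPIC_LEXICON = {
--     "Geopolitics & security": ["war","military","nuclear","sanctions","border","defense","attack","navy"],
--     "Elections & governance": ["election","vote","parliament","government","president","minister","court","policy"],
--     "Economy & markets": ["inflation","gdp","economy","bank","interest","rate","currency","trade","jobs","markets"],
--     "Tech & AI": ["ai","artificial","chip","cyber","data","software","platform"],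
--     "Climate & disasters": ["climate","flood","storm","drought","wildfire","earthquake"],
--     "Public safety & crime": ["police","arrest","trial","fraud","shooting","crime"]
-- }
--
-- # Inverted index: lexicon word -> its topic (words are unique across topics).
-- WORD_TO_TOPIC = {w: t for t, ws in TOPIC_LEXICON.items() for w in ws}
--
-- def label_cluster(cluster):
--     scores = {t: 0 for t in TOPIC_LEXICON}
--     for tok, c in cluster["tok_counts"].items():
--         t = WORD_TO_TOPIC.get(tok)
--         if t is not None:
--             scores[t] += c
--     best_topic = "Other"
--     best_score = 0
--     for t in TOPIC_LEXICON:
--         if scores[t] > best_score: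
--             best_score = scores[t]
--             best_topic = t
--     return best_topic
-- ===== Notes on version B (the rewrite author's own statement) =====
-- stated objective: idiomatic
-- what changed: B replaces A's per-topic scan over lexicon words with counts.get by a precomputed inverted index word->topic and a single pass over the cluster's token counts accumulating a scores dict, then picks the first strictly-better topic in lexicon insertion order.
import Mathlib
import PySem

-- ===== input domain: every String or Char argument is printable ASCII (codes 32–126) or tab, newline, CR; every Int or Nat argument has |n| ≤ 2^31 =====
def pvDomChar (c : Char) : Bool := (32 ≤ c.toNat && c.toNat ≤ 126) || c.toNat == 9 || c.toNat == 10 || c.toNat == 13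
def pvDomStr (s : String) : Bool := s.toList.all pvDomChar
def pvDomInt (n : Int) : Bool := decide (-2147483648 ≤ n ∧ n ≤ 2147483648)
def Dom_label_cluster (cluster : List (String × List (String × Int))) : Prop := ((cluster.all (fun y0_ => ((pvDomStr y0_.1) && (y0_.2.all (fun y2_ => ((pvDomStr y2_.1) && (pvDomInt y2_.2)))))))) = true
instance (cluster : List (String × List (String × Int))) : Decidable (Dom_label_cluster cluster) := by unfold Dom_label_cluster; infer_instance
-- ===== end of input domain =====

-- B replaces A's per-topic scan over lexicon words by an inverted word→topic index and one pass
-- over the cluster's token counts (objective: idiomatic); return value only, no mutation.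


-- ===== PORT A =====
-- module constant TOPIC_LEXICON (a dict str -> list[str]), shared by both programs
def topicLexicon : List (String × List String) :=
  [("Geopolitics & security", ["war","military","nuclear","sanctions","border","defense","attack","navy"]),
   ("Elections & governance", ["election","vote","parliament","government","president","minister","court","policy"]),
   ("Economy & markets", ["inflation","gdp","economy","bank","interest","rate","currency","trade","jobs","markets"]),
   ("Tech & AI", ["ai","artificial","chip","cyber","data","software","platform"]),
   ("Climate & disasters", ["climate","flood","storm","drought","wildfire","earthquake"]),
   ("Public safety & crime", ["police","arrest","trial","fraud","shooting","crime"])]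

-- counts = cluster["tok_counts"]; KeyError (key absent) is excluded by Pre_
def label_cluster (cluster : List (String × List (String × Int))) : String :=
  let counts : PySem.Dict String Int :=
    PySem.Dict.ofList ((PySem.Dict.ofList cluster).getD "tok_counts" [])
  let st := topicLexicon.foldl
    (fun (st : Option String × Int) tw =>
      let score := tw.2.foldl (fun s w => s + counts.getD w 0) 0
      if score > st.2 then (some tw.1, score) else st)
    (none, 0)
  match st.1 with
  | some t => t        -- best_topic or "Other" (topics are non-empty strings)
  | none => "Other"

-- ===== PORT B =====
-- WORD_TO_TOPIC = {w: t for t, ws in TOPIC_LEXICON.items() for w in ws}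
def wordToTopic : PySem.Dict String String :=
  PySem.Dict.ofList (topicLexicon.flatMap (fun tw => tw.2.map (fun w => (w, tw.1))))

def label_cluster_alt (cluster : List (String × List (String × Int))) : String :=
  let counts : PySem.Dict String Int :=
    PySem.Dict.ofList ((PySem.Dict.ofList cluster).getD "tok_counts" [])
  let scores0 : PySem.Dict String Int :=
    topicLexicon.foldl (fun d tw => d.insert tw.1 0) PySem.Dict.empty
  let scores := counts.items.foldl
    (fun (d : PySem.Dict String Int) p =>
      match wordToTopic.get? p.1 with
      | some t => d.insert t (d.getD t 0 + p.2)  -- scores[t] += c (t is always a key of scores)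
      | none => d)
    scores0
  (topicLexicon.foldl
    (fun (st : String × Int) tw =>
      if scores.getD tw.1 0 > st.2 then (tw.1, scores.getD tw.1 0) else st)
    ("Other", 0)).1

-- ===== PRECONDITION & SPEC =====
-- A raises KeyError when the cluster dict has no "tok_counts" key; exactly that is excluded.
def Pre_label_cluster (cluster : List (String × List (String × Int))) : Prop :=
  "tok_counts" ∈ cluster.map Prod.fst
instance (cluster : List (String × List (String × Int))) : Decidable (Pre_label_cluster cluster) := by
  unfold Pre_label_cluster; infer_instance

def pvWitness_label_cluster : (List (String × List (String × Int))) :=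
  [("tok_counts", [("war", 2), ("vote", 1)])]

def Spec_label_cluster (cluster : List (String × List (String × Int))) (out : String) : Prop := out = label_cluster_alt cluster
instance (cluster : List (String × List (String × Int))) (out : String) : Decidable (Spec_label_cluster cluster out) := by unfold Spec_label_cluster; infer_instance

-- ===== CLAIM (what is proved, stated in full; the proofs are below) =====
def Claim_equal_label_cluster : Prop := ∀ (cluster : List (String × List (String × Int))), Dom_label_cluster cluster → Pre_label_cluster cluster → Spec_label_cluster cluster (label_cluster cluster)

-- ===== LEMMAS AND PROOFS =====

-- sum over an association list of the entries matching key w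
def keySum (l : List (String × Int)) (w : String) : Int :=
  (l.map (fun p => if p.1 = w then p.2 else 0)).sum

theorem keySum_of_not_mem (l : List (String × Int)) (w : String)
    (h : w ∉ l.map Prod.fst) : keySum l w = 0 := by
  induction l with
  | nil => rfl
  | cons p rest ih =>
    simp only [List.map_cons, List.mem_cons, not_or] at h
    have : p.1 ≠ w := fun he => h.1 he.symm
    simp [keySum, this] at *
    simpa [keySum] using ih h.2

theorem keySum_cons (p : String × Int) (l : List (String × Int)) (w : String) :
    keySum (p :: l) w = (if p.1 = w then p.2 else 0) + keySum l w := by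
  simp [keySum]

-- getD on a Nodup-keyed dict equals the keySum of its items
theorem keySum_of_mem (l : List (String × Int)) (hl : (l.map Prod.fst).Nodup)
    (w : String) (v : Int) (hm : (w, v) ∈ l) : keySum l w = v := by
  induction l with
  | nil => cases hm
  | cons p rest ih =>
    simp only [List.map_cons, List.nodup_cons] at hl
    rcases List.mem_cons.1 hm with h | h
    · subst h
      simp [keySum_cons, keySum_of_not_mem rest w hl.1]
    · have hw : w ∈ rest.map Prod.fst := List.mem_map.2 ⟨(w, v), h, rfl⟩
      have hne : p.1 ≠ w := fun he => hl.1 (he ▸ hw)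
      rw [keySum_cons, if_neg hne, ih hl.2 h]; ring

theorem getD_eq_keySum (d : PySem.Dict String Int) (hd : d.keys.Nodup) (w : String) :
    d.getD w 0 = keySum d.items w := by
  by_cases hc : d.contains w = true
  · have hk : w ∈ d.keys := (PySem.Dict.contains_iff_mem_keys d w).1 hc
    have : ∃ p ∈ d.items, p.1 = w := by
      simpa [PySem.Dict.keys, List.mem_map] using hk
    obtain ⟨⟨k, v⟩, hp, hk1⟩ := this
    subst hk1
    rw [PySem.Dict.getD_of_mem_items d hp hd 0]
    exact (keySum_of_mem d.items hd _ v hp).symm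
  · have hc' : d.contains w = false := by simpa using hc
    rw [PySem.Dict.getD_of_not_contains d 0 hc']
    have hnk : w ∉ d.keys := fun hk => by
      simp [(PySem.Dict.contains_iff_mem_keys d w).2 hk] at hc'
    exact (keySum_of_not_mem d.items w (by simpa [PySem.Dict.keys] using hnk)).symm

-- B's accumulation loop: per-topic score after folding over the items list
theorem foldB_getD (l : List (String × Int)) (d : PySem.Dict String Int) (t : String) :
    (l.foldl (fun (d : PySem.Dict String Int) p =>
        match wordToTopic.get? p.1 with
        | some t => d.insert t (d.getD t 0 + p.2)
        | none => d) d).getD t 0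
      = d.getD t 0 + (l.map (fun p => if wordToTopic.get? p.1 = some t then p.2 else 0)).sum := by
  induction l generalizing d with
  | nil => simp
  | cons p rest ih =>
    simp only [List.foldl_cons, List.map_cons, List.sum_cons]
    cases hw : wordToTopic.get? p.1 with
    | none =>
      rw [show (match (none : Option String) with
            | some t => d.insert t (d.getD t 0 + p.2)
            | none => d) = d from rfl, ih]
      simp
    | some t' =>
      rw [show (match (some t' : Option String) with
            | some t => d.insert t (d.getD t 0 + p.2)
            | none => d) = d.insert t' (d.getD t' 0 + p.2) from rfl, ih]
      by_cases ht : t = t'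
      · subst ht; rw [PySem.Dict.getD_insert_self]; simp; ring
      · rw [PySem.Dict.getD_insert_of_ne d _ _ ht]
        have hne : ¬ (some t' = some t) := fun h => ht (Option.some.inj h).symm
        simp [hne]

set_option maxHeartbeats 2000000 in
set_option maxRecDepth 10000 in
theorem wordToTopic_keys : wordToTopic.keys = topicLexicon.flatMap (fun tw => tw.2) := by decide

set_option maxHeartbeats 2000000 in
set_option maxRecDepth 10000 in
theorem wtt_mem_iff : ∀ w ∈ topicLexicon.flatMap (fun tw => tw.2), ∀ tw ∈ topicLexicon,
    (wordToTopic.get? w = some tw.1 ↔ w ∈ tw.2) := by decide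

theorem scores0_getD : ∀ tw ∈ topicLexicon,
    (topicLexicon.foldl (fun (d : PySem.Dict String Int) tw => d.insert tw.1 0)
      PySem.Dict.empty).getD tw.1 0 = 0 := by decide

theorem lexicon_words_nodup : ∀ tw ∈ topicLexicon, tw.2.Nodup := by decide

-- the inverted index is exact: for tw a lexicon row, wordToTopic finds tw.1 iff the word is in tw.2
theorem wtt_iff (tw : String × List String) (htw : tw ∈ topicLexicon) (w : String) :
    wordToTopic.get? w = some tw.1 ↔ w ∈ tw.2 := by
  by_cases hw : w ∈ topicLexicon.flatMap (fun tw => tw.2)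
  · exact wtt_mem_iff w hw tw htw
  · constructor
    · intro h
      rw [(PySem.Dict.get?_eq_none_iff_contains wordToTopic w).mpr ?_] at h
      · cases h
      · by_contra hc
        have : w ∈ wordToTopic.keys :=
          (PySem.Dict.contains_iff_mem_keys wordToTopic w).1 (by simpa using hc)
        rw [wordToTopic_keys] at this
        exact hw this
    · intro h
      exact absurd (List.mem_flatMap.2 ⟨tw, htw, h⟩) hw

-- pointwise split of the membership indicator at the head of ws
theorem sum_getD_items (d : PySem.Dict String Int) (hd : d.keys.Nodup)
    (ws : List String) (hws : ws.Nodup) :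
    ws.foldl (fun s w => s + d.getD w 0) 0
      = (d.items.map (fun p => if p.1 ∈ ws then p.2 else 0)).sum := by
  induction ws with
  | nil => simp
  | cons w rest ih =>
    simp only [List.nodup_cons] at hws
    have step : ∀ p : String × Int,
        (if p.1 ∈ w :: rest then p.2 else 0)
          = (if p.1 = w then p.2 else 0) + (if p.1 ∈ rest then p.2 else 0) := by
      intro p
      by_cases h1 : p.1 = w
      · have hw2 : w ∉ rest := hws.1
        simp [h1, hw2]
      · by_cases h2 : p.1 ∈ rest <;> simp [h1, h2]
    simp only [step, PySem.List.sum_map_add_int]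
    rw [← ih hws.2]
    have hfold : ∀ (l : List String) (a b : Int),
        l.foldl (fun s w => s + d.getD w 0) (a + b) = a + l.foldl (fun s w => s + d.getD w 0) b := by
      intro l
      induction l with
      | nil => intro a b; rfl
      | cons x xs ihl => intro a b; simp only [List.foldl_cons]; rw [add_assoc, ihl]
    simp only [List.foldl_cons, zero_add]
    rw [show d.getD w 0 = d.getD w 0 + 0 by ring, hfold]
    rw [getD_eq_keySum d hd w]
    rfl

-- A's per-topic score equals B's accumulated score
theorem score_eq (counts : PySem.Dict String Int) (hc : counts.keys.Nodup)
    (tw : String × List String) (htw : tw ∈ topicLexicon) :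
    tw.2.foldl (fun s w => s + counts.getD w 0) 0
      = (counts.items.foldl (fun (d : PySem.Dict String Int) p =>
          match wordToTopic.get? p.1 with
          | some t => d.insert t (d.getD t 0 + p.2)
          | none => d)
          (topicLexicon.foldl (fun d tw => d.insert tw.1 0) PySem.Dict.empty)).getD tw.1 0 := by
  rw [foldB_getD, scores0_getD tw htw, zero_add]
  have hws : tw.2.Nodup := lexicon_words_nodup tw htw
  have hsum : ∀ p : String × Int,
      (if wordToTopic.get? p.1 = some tw.1 then p.2 else 0) = (if p.1 ∈ tw.2 then p.2 else 0) := by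
    intro p
    by_cases h : p.1 ∈ tw.2
    · simp [h, (wtt_iff tw htw p.1).2 h]
    · have : ¬ wordToTopic.get? p.1 = some tw.1 := fun hc => h ((wtt_iff tw htw p.1).1 hc)
      simp [h, this]
  simp only [hsum]
  -- reduce A's foldl-sum to a mapped sum, then compare with the items sum
  rw [sum_getD_items counts hc tw.2 hws]

-- the two selection loops agree given equal scores
def optStr : Option String → String
  | some t => t
  | none => "Other"

theorem select_eq (l : List (String × List String)) (f g : (String × List String) → Int)
    (hfg : ∀ tw ∈ l, f tw = g tw) (o : Option String) (s : Int) :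
    optStr (l.foldl (fun (st : Option String × Int) tw =>
        if f tw > st.2 then (some tw.1, f tw) else st) (o, s)).1
      = (l.foldl (fun (st : String × Int) tw =>
        if g tw > st.2 then (tw.1, g tw) else st) (optStr o, s)).1 := by
  induction l generalizing o s with
  | nil => rfl
  | cons tw rest ih =>
    have h := hfg tw (by simp)
    have hrest : ∀ x ∈ rest, f x = g x := fun x hx => hfg x (by simp [hx])
    simp only [List.foldl_cons, h]
    by_cases hgt : g tw > s
    · simp only [hgt, if_pos]
      exact ih hrest (some tw.1) (g tw)
    · simp only [hgt]
      exact ih hrest o s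

-- ===== VERDICT (by name: the statement is the Claim_ definition above) =====
theorem label_cluster_spec : Claim_equal_label_cluster := by
  intro cluster _ _
  unfold Spec_label_cluster label_cluster label_cluster_alt
  simp only []
  set counts : PySem.Dict String Int :=
    PySem.Dict.ofList ((PySem.Dict.ofList cluster).getD "tok_counts" []) with hcounts
  have hnd : counts.keys.Nodup := PySem.Dict.nodup_keys_ofList _
  have hsc : ∀ tw ∈ topicLexicon,
      (fun tw : String × List String => tw.2.foldl (fun s w => s + counts.getD w 0) 0) tw
        = (fun tw : String × List String =>
            (counts.items.foldl (fun (d : PySem.Dict String Int) p =>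
              match wordToTopic.get? p.1 with
              | some t => d.insert t (d.getD t 0 + p.2)
              | none => d)
              (topicLexicon.foldl (fun d tw => d.insert tw.1 0) PySem.Dict.empty)).getD tw.1 0) tw :=
    fun tw htw => score_eq counts hnd tw htw
  have := select_eq topicLexicon _ _ hsc none 0
  simpa [optStr] using this
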